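-- pv_equiv track=rewrite | github.com/mmiguel6288code/bitarchitect | bitarchitect/pattern.py | get_structure_index
-- ===== SOURCE A (Python) =====
-- def get_structure_index(structure_pattern,stream_index):
--     """
--     Translates the stream index into a sequence of structure indices identifying an item in a hierarchy whose structure is specified by the provided structure pattern.
--     >>> get_structure_index('...',1)
--     [1]
--     >>> get_structure_index('.[.].',1)
--     [1, 0]
--     >>> get_structure_index('.[[...],..].',1)
--     [1, 0, 0]
--     >>> get_structure_index('.[[...]...].',2)
--     [1, 0, 1]
--     >>> get_structure_index('.[[...]...].',3)
--     [1, 0, 2]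
--     >>> get_structure_index('.[[...]...].',4)
--     [1, 1]
--     >>> get_structure_index('.[[...]...].',5)
--     [1, 2]
--     >>> get_structure_index('.[[...]...].',6)
--     [1, 3]
--     >>> get_structure_index('.[[...]...].',7)
--     [2]
--     """
--     structure_index = [0]
--     current_stream_index = 0
--     for p in structure_pattern:
--         if p == '[':
--             structure_index.append(0)
--         elif p == '.':
--             if current_stream_index == stream_index:
--                 return structure_index
--             structure_index[-1] += 1
--             current_stream_index += 1
--         elif p == ']':
--             structure_index.pop(-1)
--             structure_index[-1] += 1
--         else:
--             raise Exception('Invalid character in structure pattern: %s' % repr(p))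
--     raise Exception('Provided stream index does not exist in the provided structure pattern')
-- ===== SOURCE B (Python) =====
-- def get_structure_index(structure_pattern, stream_index):
--     """Recursive-descent parse of the bracket nesting instead of a flat loop with a live stack."""
--     n = len(structure_pattern)
--
--     def parse(i, count, path):
--         # Parses one group body starting at position i; `path` are the indices leading
--         # to this group.  Returns (True, result, _, _) when the stream_index-th dot was
--         # found, else (False, None, position after this group's ']', updated dot count).
--         counter = 0
--         while i < n:
--             c = structure_pattern[i]
--             if c == '.':
--                 if count == stream_index:
--                     return True, path + [counter], None, None
--                 count += 1
--                 counter += 1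
--                 i += 1
--             elif c == '[':
--                 found, res, i2, count2 = parse(i + 1, count, path + [counter])
--                 if found:
--                     return True, res, None, None
--                 i, count = i2, count2
--                 counter += 1
--             elif c == ']':
--                 return False, None, i + 1, count
--             else:
--                 raise Exception('Invalid character in structure pattern: %s' % repr(c))
--         return False, None, i, count
--
--     found, res, _, _ = parse(0, 0, [])
--     if found:
--         return res
--     raise Exception('Provided stream index does not exist in the provided structure pattern')
-- ===== Notes on version B (the rewrite author's own statement) =====
-- stated objective: alternative
-- what changed: Replaces A's single flat loop maintaining a live index stack with a recursive-descent parser over the bracket nesting that threads the dot count and index path through the recursion.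
import Mathlib
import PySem

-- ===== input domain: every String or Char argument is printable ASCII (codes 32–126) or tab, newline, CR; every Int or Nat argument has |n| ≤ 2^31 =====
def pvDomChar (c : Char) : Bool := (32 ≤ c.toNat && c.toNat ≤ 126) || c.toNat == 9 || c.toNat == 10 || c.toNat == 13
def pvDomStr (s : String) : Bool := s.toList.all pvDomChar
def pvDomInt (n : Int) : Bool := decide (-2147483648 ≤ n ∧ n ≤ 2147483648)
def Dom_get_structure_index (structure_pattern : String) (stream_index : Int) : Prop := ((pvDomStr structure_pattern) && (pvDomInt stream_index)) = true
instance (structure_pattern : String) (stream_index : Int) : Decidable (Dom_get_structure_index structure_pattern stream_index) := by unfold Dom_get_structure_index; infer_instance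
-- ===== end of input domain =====

-- B replaces A's flat loop over a live index stack by a recursive-descent parse of the
-- bracket nesting (objective: alternative decomposition, same cost). Equivalence of
-- return values is claimed on Pre_ (exactly where the Python A returns normally).

-- ===== PORT A =====
-- `structure_index[-1] += 1`; on [] Python raises IndexError (excluded by Pre_), port returns []
def incLast : List Int → List Int
  | [] => []
  | [x] => [x + 1]
  | x :: y :: xs => x :: incLast (y :: xs)

def goA : List Char → Int → List Int → Int → List Int
  | [], _, _, _ => []  -- raise "does not exist" (excluded by Pre_)
  | p :: rest, k, si, cur =>
    if p = '[' then goA rest k (si ++ [0]) cur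
    else if p = '.' then
      if cur = k then si else goA rest k (incLast si) (cur + 1)
    else if p = ']' then goA rest k (incLast si.dropLast) cur  -- pop(-1) then [-1]+=1 (empty-stack IndexError excluded by Pre_)
    else []  -- raise invalid character (excluded by Pre_)

def get_structure_index (structure_pattern : String) (stream_index : Int) : List Int :=
  goA structure_pattern.toList stream_index [0] 0

-- ===== PORT B =====
inductive BRes where
  | found : List Int → BRes
  | ended : List Char → Int → BRes
  deriving DecidableEq, Repr

-- recursive-descent parser of Source B; the Nat fuel only makes the recursion total
-- (fuel = length of the pattern + 1 always suffices)
def parseB : Nat → List Char → Int → Int → List Int → Int → BRes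
  | 0, _, _, count, _, _ => .ended [] count  -- fuel guard, never reached from get_structure_index_alt
  | fuel + 1, cs, k, count, path, counter =>
    match cs with
    | [] => .ended [] count
    | c :: rest =>
      if c = '.' then
        if count = k then .found (path ++ [counter])
        else parseB fuel rest k (count + 1) path (counter + 1)
      else if c = '[' then
        match parseB fuel rest k count (path ++ [counter]) 0 with
        | .found res => .found res
        | .ended r c2 => parseB fuel r k c2 path (counter + 1)
      else if c = ']' then .ended rest count
      else .ended [] count  -- raise invalid character (excluded by Pre_)

def get_structure_index_alt (structure_pattern : String) (stream_index : Int) : List Int :=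
  match parseB (structure_pattern.toList.length + 1) structure_pattern.toList stream_index 0 [] 0 with
  | .found res => res
  | .ended _ _ => []  -- raise "does not exist" (excluded by Pre_)

-- ===== PRECONDITION & SPEC =====
-- Validity scan: before the stream_index-th '.' every character is '.', '[' or ']',
-- every ']' closes an open '[', and that '.' exists. This is exactly where A returns
-- normally; everywhere else Python A raises (Exception or IndexError), so nothing
-- A returns on is excluded.
def scanOk : List Char → Int → Int → Bool
  | [], _, _ => false
  | c :: rest, k, d =>
    if c = '.' then (decide (k = 0)) || scanOk rest (k - 1) d
    else if c = '[' then scanOk rest k (d + 1)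
    else if c = ']' then (decide (2 ≤ d)) && scanOk rest k (d - 1)
    else false

def Pre_get_structure_index (structure_pattern : String) (stream_index : Int) : Prop :=
  scanOk structure_pattern.toList stream_index 1 = true
instance (structure_pattern : String) (stream_index : Int) : Decidable (Pre_get_structure_index structure_pattern stream_index) := by
  unfold Pre_get_structure_index; infer_instance

def pvWitness_get_structure_index : String × Int := (".[[...]...].", 4)

def Spec_get_structure_index (structure_pattern : String) (stream_index : Int) (out : List Int) : Prop := out = get_structure_index_alt structure_pattern stream_index
instance (structure_pattern : String) (stream_index : Int) (out : List Int) : Decidable (Spec_get_structure_index structure_pattern stream_index out) := by unfold Spec_get_structure_index; infer_instance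

-- ===== CLAIM (what is proved, stated in full; the proofs are below) =====
def Claim_equal_get_structure_index : Prop := ∀ (structure_pattern : String) (stream_index : Int), Dom_get_structure_index structure_pattern stream_index → Pre_get_structure_index structure_pattern stream_index → Spec_get_structure_index structure_pattern stream_index (get_structure_index structure_pattern stream_index)

-- ===== LEMMAS AND PROOFS =====
lemma incLast_concat (xs : List Int) (c : Int) : incLast (xs ++ [c]) = xs ++ [c + 1] := by
  induction xs with
  | nil => simp [incLast]
  | cons x xs ih =>
    cases xs with
    | nil => simp [incLast]
    | cons y ys => simpa [incLast] using ih

-- Simulation: while B's parser runs with state (count, path, counter), A's loop runs the same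
-- characters with stack path ++ [counter] and stream counter count.
lemma sim : ∀ (fuel : Nat) (cs : List Char) (k count : Int) (path : List Int) (counter : Int),
    cs.length < fuel →
    scanOk cs (k - count) (path.length + 1) = true →
    (∀ res, parseB fuel cs k count path counter = .found res →
        goA cs k (path ++ [counter]) count = res) ∧
    (∀ r c2, parseB fuel cs k count path counter = .ended r c2 →
        path ≠ [] ∧ r.length < cs.length ∧ scanOk r (k - c2) path.length = true ∧
        goA cs k (path ++ [counter]) count = goA r k (incLast path) c2) := by
  intro fuel
  induction fuel with
  | zero => intro cs k count path counter hlt; omega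
  | succ fuel ih =>
    intro cs k count path counter hlt hscan
    cases cs with
    | nil => simp [scanOk] at hscan
    | cons c rest =>
      by_cases hdot : c = '.'
      · subst hdot
        simp only [scanOk] at hscan
        by_cases hk : count = k
        · subst hk
          constructor
          · intro res hres
            simp only [parseB] at hres
            cases hres
            simp [goA]
          · intro r c2 hres
            simp [parseB] at hres
        · have hk0 : ¬ (k - count = 0) := by omega
          have hscan' : scanOk rest (k - (count + 1)) (path.length + 1) = true := by
            simp [hk0] at hscan
            have : k - count - 1 = k - (count + 1) := by omega
            rwa [this] at hscan
          have := ih rest k (count + 1) path (counter + 1) (by simpa using Nat.lt_of_succ_lt_succ hlt) hscan'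
          have hstep : parseB (fuel + 1) ('.' :: rest) k count path counter
              = parseB fuel rest k (count + 1) path (counter + 1) := by
            simp [parseB, hk]
          have hgoA : goA ('.' :: rest) k (path ++ [counter]) count
              = goA rest k (path ++ [counter + 1]) (count + 1) := by
            simp [goA, hk, incLast_concat]
          constructor
          · intro res hres
            rw [hstep] at hres
            rw [hgoA]
            exact this.1 res hres
          · intro r c2 hres
            rw [hstep] at hres
            obtain ⟨h1, h2, h3, h4⟩ := this.2 r c2 hres
            exact ⟨h1, by simpa using Nat.lt_succ_of_lt h2, h3, by rw [hgoA]; exact h4⟩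
      · by_cases hop : c = '['
        · subst hop
          have hne : ¬ ('[' = '.') := by decide
          simp only [scanOk, if_neg hne] at hscan
          have hscan' : scanOk rest (k - count) ((path ++ [counter]).length + 1) = true := by
            simpa [Nat.add_assoc] using hscan
          have hnested := ih rest k count (path ++ [counter]) 0
            (by simpa using Nat.lt_of_succ_lt_succ hlt) hscan'
          have hgoA : goA ('[' :: rest) k (path ++ [counter]) count
              = goA rest k (path ++ [counter] ++ [0]) count := by
            simp [goA]
          cases hres0 : parseB fuel rest k count (path ++ [counter]) 0 with
          | found res =>
            have hstep : parseB (fuel + 1) ('[' :: rest) k count path counter = .found res := by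
              simp [parseB, hres0, hne]
            constructor
            · intro res' hres'
              rw [hstep] at hres'
              cases hres'
              rw [hgoA]
              exact hnested.1 res hres0
            · intro r c2 hres'
              rw [hstep] at hres'
              cases hres'
          | ended r c2 =>
            obtain ⟨_, hrlen, hrscan, hchain⟩ := hnested.2 r c2 hres0
            have hrscan' : scanOk r (k - c2) (path.length + 1) = true := by
              simpa using hrscan
            have hcont := ih r k c2 path (counter + 1)
              (by have := Nat.lt_of_succ_lt_succ hlt; omega) hrscan'
            have hstep : parseB (fuel + 1) ('[' :: rest) k count path counter
                = parseB fuel r k c2 path (counter + 1) := by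
              simp [parseB, hres0, hne]
            have hchain' : goA ('[' :: rest) k (path ++ [counter]) count
                = goA r k (path ++ [counter + 1]) c2 := by
              rw [hgoA, hchain, incLast_concat]
            constructor
            · intro res hres
              rw [hstep] at hres
              rw [hchain']
              exact hcont.1 res hres
            · intro r2 c3 hres
              rw [hstep] at hres
              obtain ⟨h1, h2, h3, h4⟩ := hcont.2 r2 c3 hres
              refine ⟨h1, by simp; omega, h3, ?_⟩
              rw [hchain']
              exact h4
        · by_cases hcl : c = ']'
          · subst hcl
            have hne1 : ¬ (']' = '.') := by decide
            have hne2 : ¬ (']' = '[') := by decide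
            simp [scanOk] at hscan
            obtain ⟨hd, hscan'⟩ := hscan
            have hpath : path ≠ [] := by
              intro h; subst h; simp at hd
            have hstep : parseB (fuel + 1) (']' :: rest) k count path counter
                = .ended rest count := by
              simp [parseB, hne1, hne2]
            constructor
            · intro res hres
              rw [hstep] at hres
              cases hres
            · intro r c2 hres
              rw [hstep] at hres
              cases hres
              refine ⟨hpath, by simp, ?_, ?_⟩
              · exact hscan'
              · simp [goA]
          · simp [scanOk, hdot, hop, hcl] at hscan

-- ===== VERDICT (by name: the statement is the Claim_ definition above) =====
theorem get_structure_index_spec : Claim_equal_get_structure_index := by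
  intro s k _ hpre
  unfold Spec_get_structure_index get_structure_index get_structure_index_alt
  have hscan : scanOk s.toList (k - 0) (([] : List Int).length + 1) = true := by
    simpa using hpre
  have h := sim (s.toList.length + 1) s.toList k 0 [] 0 (Nat.lt_succ_self _) hscan
  cases hres : parseB (s.toList.length + 1) s.toList k 0 [] 0 with
  | found res =>
    have := h.1 res hres
    simpa using this
  | ended r c2 =>
    exact absurd rfl (h.2 r c2 hres).1
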